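-- pv_equiv track=rewrite | github.com/mikopaj01/TimKod | lab1/lab1_Timkod.py | generate_dict_with_count
-- ===== SOURCE A (Python) =====
-- def generate_dict_with_count(level, text):
--     dictionary = {}
--     for index, letter in enumerate(text[level:]):
--         key = text[index: level + index]
--
--         if not key in dictionary:
--             dictionary[key] = {}
--
--         if letter in dictionary[key]:
--             dictionary[key][letter] += 1
--         else:
--             dictionary[key][letter] = 1
--
--     return dictionary
-- ===== SOURCE B (Python) =====
-- def generate_dict_with_count(level, text):
--     # Phase 1: collect all (context, next_letter) pairs; Phase 2: tally them in one
--     # flat counter; Phase 3: reshape the flat counts into the nested dict.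
--     pairs = [(text[i: level + i], ch) for i, ch in enumerate(text[level:])]
--     counts = {}
--     for p in pairs:
--         counts[p] = counts.get(p, 0) + 1
--     result = {}
--     for (key, letter), c in counts.items():
--         if key not in result:
--             result[key] = {}
--         result[key][letter] = c
--     return result
-- ===== Notes on version B (the rewrite author's own statement) =====
-- stated objective: alternative
-- what changed: A builds the nested dict incrementally in one pass, updating inner counts in place; B first materialises the list of (context, next-letter) pairs, tallies them into one flat pair-keyed counter, and then reshapes the flat counts into the nested dict in a second pass.
import Mathlib
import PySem

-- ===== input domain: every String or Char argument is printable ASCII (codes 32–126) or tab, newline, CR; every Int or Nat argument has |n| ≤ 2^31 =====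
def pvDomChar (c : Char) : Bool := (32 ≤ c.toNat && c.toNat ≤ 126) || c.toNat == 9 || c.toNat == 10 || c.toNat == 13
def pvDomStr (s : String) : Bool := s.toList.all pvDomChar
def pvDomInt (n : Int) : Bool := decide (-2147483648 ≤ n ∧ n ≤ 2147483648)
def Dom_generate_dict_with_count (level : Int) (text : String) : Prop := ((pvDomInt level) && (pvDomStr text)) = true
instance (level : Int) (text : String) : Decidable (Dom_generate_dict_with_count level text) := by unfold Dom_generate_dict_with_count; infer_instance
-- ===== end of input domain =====

-- B replaces A's incremental nested-dict construction by a collect/tally/reshape pipeline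
-- (pair list → one flat counter → reshape into the nested dict); objective: alternative decomposition, same cost.

-- ===== PORT A =====
-- incremental: one pass, nested dict of counts updated in place
def generate_dict_with_count (level : Int) (text : String) : List (String × List (String × Int)) :=
  let dictionary : PySem.Dict String (PySem.Dict String Int) :=
    (PySem.List.enumerate (PySem.Str.slice text (some level) none).toList 0).foldl
      (fun d p =>
        let key := PySem.Str.slice text (some p.1) (some (level + p.1))
        let letter := String.ofList [p.2]
        let d := if d.contains key then d else d.insert key PySem.Dict.empty
        let inner := d.getD key PySem.Dict.empty
        if inner.contains letter then d.insert key (inner.insert letter (inner.getD letter 0 + 1))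
        else d.insert key (inner.insert letter 1))
      PySem.Dict.empty
  dictionary.items.map (fun q => (q.1, q.2.items))

-- ===== PORT B =====
-- three phases: pair list, flat (key, letter) counter, reshape into the nested dict
def generate_dict_with_count_alt (level : Int) (text : String) : List (String × List (String × Int)) :=
  let pairs : List (String × String) :=
    (PySem.List.enumerate (PySem.Str.slice text (some level) none).toList 0).map
      (fun p => (PySem.Str.slice text (some p.1) (some (level + p.1)), String.ofList [p.2]))
  let counts : PySem.Dict (String × String) Int :=
    pairs.foldl (fun d p => d.insert p (d.getD p 0 + 1)) PySem.Dict.empty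
  let result : PySem.Dict String (PySem.Dict String Int) :=
    counts.items.foldl
      (fun r q =>
        let r := if r.contains q.1.1 then r else r.insert q.1.1 PySem.Dict.empty
        r.insert q.1.1 ((r.getD q.1.1 PySem.Dict.empty).insert q.1.2 q.2))
      PySem.Dict.empty
  result.items.map (fun q => (q.1, q.2.items))

-- ===== PRECONDITION & SPEC =====
def Spec_generate_dict_with_count (level : Int) (text : String) (out : List (String × List (String × Int))) : Prop := out = generate_dict_with_count_alt level text
instance (level : Int) (text : String) (out : List (String × List (String × Int))) : Decidable (Spec_generate_dict_with_count level text out) := by unfold Spec_generate_dict_with_count; infer_instance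

-- ===== CLAIM (what is proved, stated in full; the proofs are below) =====
def Claim_equal_generate_dict_with_count : Prop := ∀ (level : Int) (text : String), Dom_generate_dict_with_count level text → Spec_generate_dict_with_count level text (generate_dict_with_count level text)

-- ===== LEMMAS AND PROOFS =====

-- loop body of A, on an already-computed (key, letter) pair
def pvStepA (d : PySem.Dict String (PySem.Dict String Int)) (p : String × String) :
    PySem.Dict String (PySem.Dict String Int) :=
  let d := if d.contains p.1 then d else d.insert p.1 PySem.Dict.empty
  let inner := d.getD p.1 PySem.Dict.empty
  if inner.contains p.2 then d.insert p.1 (inner.insert p.2 (inner.getD p.2 0 + 1))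
  else d.insert p.1 (inner.insert p.2 1)

-- loop body of B's reshape phase
def pvStepR (d : PySem.Dict String (PySem.Dict String Int)) (q : (String × String) × Int) :
    PySem.Dict String (PySem.Dict String Int) :=
  let d := if d.contains q.1.1 then d else d.insert q.1.1 PySem.Dict.empty
  d.insert q.1.1 ((d.getD q.1.1 PySem.Dict.empty).insert q.1.2 q.2)

-- "ensure key k, then write inner[l] := v" — the shape both loop bodies share
def pvStepRaw (d : PySem.Dict String (PySem.Dict String Int)) (k l : String) (v : Int) :
    PySem.Dict String (PySem.Dict String Int) :=
  let d := if d.contains k then d else d.insert k PySem.Dict.empty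
  d.insert k ((d.getD k PySem.Dict.empty).insert l v)

-- the inner dict the grouping assigns to outer key k
def pvInner (qs : List (String × String)) (c : String × String → Int) (k : String) :
    PySem.Dict String Int :=
  PySem.Dict.mk ((qs.filter (fun q => q.1 == k)).map (fun q => (q.2, c q)))

-- the grouped nested dict both folds converge to
def pvGroup (qs : List (String × String)) (c : String × String → Int) :
    PySem.Dict String (PySem.Dict String Int) :=
  PySem.Dict.mk ((PySem.Set.ofList (qs.map Prod.fst)).map (fun k => (k, pvInner qs c k)))

def pvPairs (level : Int) (text : String) : List (String × String) :=
  (PySem.List.enumerate (PySem.Str.slice text (some level) none).toList 0).map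
    (fun p => (PySem.Str.slice text (some p.1) (some (level + p.1)), String.ofList [p.2]))

lemma pvA_eq (level : Int) (text : String) :
    generate_dict_with_count level text
      = ((pvPairs level text).foldl pvStepA PySem.Dict.empty).items.map (fun q => (q.1, q.2.items)) := by
  unfold generate_dict_with_count pvPairs pvStepA
  rw [List.foldl_map]

lemma pvB_eq (level : Int) (text : String) :
    generate_dict_with_count_alt level text
      = ((((pvPairs level text).foldl (fun d p => d.insert p (d.getD p 0 + 1)) PySem.Dict.empty).items).foldl
          pvStepR PySem.Dict.empty).items.map (fun q => (q.1, q.2.items)) := by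
  unfold generate_dict_with_count_alt pvPairs pvStepR
  rfl

lemma pvGroup_keys (qs : List (String × String)) (c : String × String → Int) :
    (pvGroup qs c).keys = PySem.Set.ofList (qs.map Prod.fst) := by
  simp only [pvGroup, PySem.Dict.keys_mk, List.map_map]
  rw [show ((fun (x : String × PySem.Dict String Int) => x.1) ∘ fun k => (k, pvInner qs c k)) = id from rfl,
    List.map_id]

lemma pvGroup_contains (qs : List (String × String)) (c : String × String → Int) (k : String) :
    (pvGroup qs c).contains k = decide (k ∈ qs.map Prod.fst) := by
  rw [PySem.Dict.contains_eq_decide_mem_keys, pvGroup_keys]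
  simp [PySem.Set.mem_ofList]

lemma pvGroup_get? (qs : List (String × String)) (c : String × String → Int) (k : String)
    (hk : k ∈ qs.map Prod.fst) :
    (pvGroup qs c).get? k = some (pvInner qs c k) := by
  apply PySem.Dict.get?_of_mem_items
  · exact List.mem_map.mpr ⟨k, (PySem.Set.mem_ofList _ _).mpr hk, rfl⟩
  · rw [pvGroup_keys]; exact PySem.Set.nodup_ofList _

lemma pvGroup_getD (qs : List (String × String)) (c : String × String → Int) (k : String) :
    (pvGroup qs c).getD k PySem.Dict.empty = pvInner qs c k := by
  by_cases hk : k ∈ qs.map Prod.fst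
  · rw [PySem.Dict.getD_eq_get?_getD, pvGroup_get? qs c k hk]; rfl
  · rw [PySem.Dict.getD_of_not_contains _ _ (by rw [pvGroup_contains]; simpa using hk)]
    have : qs.filter (fun q => q.1 == k) = [] := by
      rw [List.filter_eq_nil_iff]
      intro q hq hq'
      exact hk (List.mem_map.mpr ⟨q, hq, by simpa using hq'⟩)
    simp [pvInner, this]
    rfl

lemma pvInner_contains (qs : List (String × String)) (c : String × String → Int) (k l : String) :
    (pvInner qs c k).contains l = decide ((k, l) ∈ qs) := by
  rw [PySem.Dict.contains_eq_decide_mem_keys]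
  simp only [pvInner, PySem.Dict.keys_mk, List.map_map]
  apply decide_eq_decide.mpr
  constructor
  · intro h
    obtain ⟨q, hq, he⟩ := List.mem_map.mp h
    obtain ⟨hqs, hq1⟩ := List.mem_filter.mp hq
    have hk : q.1 = k := by simpa using hq1
    have hl : q.2 = l := by simpa using he
    have hq' : q = (k, l) := Prod.ext_iff.mpr ⟨hk, hl⟩
    exact hq' ▸ hqs
  · intro h
    exact List.mem_map.mpr ⟨(k, l), List.mem_filter.mpr ⟨h, by simp⟩, rfl⟩

lemma pvInner_getD (qs : List (String × String)) (c : String × String → Int) (k l : String)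
    (h : (k, l) ∈ qs) : (pvInner qs c k).getD l 0 = c (k, l) := by
  induction qs with
  | nil => simp at h
  | cons q rest ih =>
    by_cases hq1 : q.1 = k
    · by_cases hq2 : q.2 = l
      · have hq : q = (k, l) := by rw [Prod.ext_iff]; exact ⟨hq1, hq2⟩
        subst hq
        simp [pvInner, PySem.Dict.getD_eq_get?_getD, PySem.Dict.get?_mk_cons]
      · have hmem : (k, l) ∈ rest := by
          rcases List.mem_cons.mp h with h' | h'
          · exact absurd (congrArg Prod.snd h'.symm) hq2
          · exact h'
        have := ih hmem
        simp only [pvInner, List.filter_cons, hq1] at *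
        simpa [PySem.Dict.getD_eq_get?_getD, PySem.Dict.get?_mk_cons, hq2, Ne.symm hq2] using this
    · have hmem : (k, l) ∈ rest := by
        rcases List.mem_cons.mp h with h' | h'
        · exact absurd (congrArg Prod.fst h'.symm) hq1
        · exact h'
      have := ih hmem
      simpa [pvInner, List.filter_cons, hq1] using this

lemma pvFilter_add_self (qs : List (String × String)) (k l : String) :
    (PySem.Set.add qs (k, l)).filter (fun q => q.1 == k)
      = if (k, l) ∈ qs then qs.filter (fun q => q.1 == k)
        else qs.filter (fun q => q.1 == k) ++ [(k, l)] := by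
  by_cases h : (k, l) ∈ qs
  · rw [PySem.Set.add_of_mem h, if_pos h]
  · rw [PySem.Set.add_of_not_mem h, if_neg h, List.filter_append]
    simp

lemma pvFilter_add_other (qs : List (String × String)) (k l k' : String) (hne : k' ≠ k) :
    (PySem.Set.add qs (k, l)).filter (fun q => q.1 == k')
      = qs.filter (fun q => q.1 == k') := by
  by_cases h : (k, l) ∈ qs
  · rw [PySem.Set.add_of_mem h]
  · rw [PySem.Set.add_of_not_mem h, List.filter_append]
    simp [Ne.symm hne]

lemma pvInner_insert (qs : List (String × String)) (c : String × String → Int) (k l : String) (v : Int) :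
    (pvInner qs c k).insert l v
      = pvInner (PySem.Set.add qs (k, l)) (fun q => if q = (k, l) then v else c q) k := by
  by_cases h : (k, l) ∈ qs
  · have hc : (pvInner qs c k).contains l = true := by
      rw [pvInner_contains]; exact decide_eq_true h
    apply PySem.Dict.ext
    rw [PySem.Dict.items_insert_of_contains _ _ hc]
    unfold pvInner
    rw [pvFilter_add_self, if_pos h]
    show List.map _ (List.map _ _) = List.map _ _
    rw [List.map_map]
    apply List.map_congr_left
    intro q hq
    have hq1 : q.1 = k := by simpa using (List.mem_filter.mp hq).2
    by_cases hq2 : q.2 = l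
    · have : q = (k, l) := by rw [Prod.ext_iff]; exact ⟨hq1, hq2⟩
      simp [Function.comp, this]
    · simp only [Function.comp]
      have hqne : q ≠ (k, l) := fun he => hq2 (congrArg Prod.snd he)
      simp [hq2, hqne]
  · have hc : (pvInner qs c k).contains l = false := by
      rw [pvInner_contains]; exact decide_eq_false h
    apply PySem.Dict.ext
    rw [PySem.Dict.items_insert_of_not_contains _ _ hc]
    unfold pvInner
    rw [pvFilter_add_self, if_neg h]
    show List.map _ _ ++ _ = List.map _ _
    rw [List.map_append]
    congr 1
    · apply List.map_congr_left
      intro q hq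
      have hqne : q ≠ (k, l) := fun he => h (he ▸ (List.mem_filter.mp hq).1)
      simp [hqne]
    · simp

lemma pvInner_add_other (qs : List (String × String)) (c : String × String → Int) (k l k' : String)
    (v : Int) (hne : k' ≠ k) :
    pvInner (PySem.Set.add qs (k, l)) (fun q => if q = (k, l) then v else c q) k' = pvInner qs c k' := by
  unfold pvInner
  rw [pvFilter_add_other qs k l k' hne]
  congr 1
  apply List.map_congr_left
  intro q hq
  have hq1 : q.1 = k' := by simpa using (List.mem_filter.mp hq).2
  have hqne : q ≠ (k, l) := fun he => hne (by rw [← hq1, he])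
  simp [hqne]

lemma pvKeys_add (qs : List (String × String)) (k l : String) :
    PySem.Set.ofList ((PySem.Set.add qs (k, l)).map Prod.fst)
      = PySem.Set.add (PySem.Set.ofList (qs.map Prod.fst)) k := by
  by_cases h : (k, l) ∈ qs
  · rw [PySem.Set.add_of_mem h, PySem.Set.add_of_mem]
    rw [PySem.Set.mem_ofList]
    exact List.mem_map.mpr ⟨(k, l), h, rfl⟩
  · rw [PySem.Set.add_of_not_mem h, List.map_append]
    exact PySem.Set.ofList_append_singleton _ _

-- CORE: one raw write on the grouped dict is grouping with the pair added and its count set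
lemma pvStepRaw_group (qs : List (String × String)) (c : String × String → Int)
    (k l : String) (v : Int) :
    pvStepRaw (pvGroup qs c) k l v
      = pvGroup (PySem.Set.add qs (k, l)) (fun q => if q = (k, l) then v else c q) := by
  unfold pvStepRaw
  by_cases hk : k ∈ qs.map Prod.fst
  · rw [pvGroup_contains]
    simp only [decide_eq_true hk, if_true, pvGroup_getD]
    apply PySem.Dict.ext
    rw [PySem.Dict.items_insert_of_contains _ _ (by rw [pvGroup_contains]; exact decide_eq_true hk)]
    show List.map _ (List.map _ _) = (pvGroup _ _).items
    unfold pvGroup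
    show _ = List.map _ _
    rw [pvKeys_add, PySem.Set.add_of_mem ((PySem.Set.mem_ofList _ _).mpr hk), List.map_map]
    apply List.map_congr_left
    intro k' _
    by_cases hk' : k' = k
    · subst hk'
      simp only [Function.comp, BEq.rfl, if_pos]
      rw [pvInner_insert]
    · simp only [Function.comp]
      rw [if_neg (by simpa using hk'), pvInner_add_other qs c k l k' v hk']
  · rw [pvGroup_contains]
    simp only [decide_eq_false hk, Bool.false_eq_true, if_false]
    rw [PySem.Dict.insert_insert_self, PySem.Dict.getD_insert_self]
    apply PySem.Dict.ext
    rw [PySem.Dict.items_insert_of_not_contains _ _ (by rw [pvGroup_contains]; exact decide_eq_false hk)]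
    have hnotin : (k, l) ∉ qs := fun h => hk (List.mem_map.mpr ⟨(k, l), h, rfl⟩)
    show _ = (pvGroup _ _).items
    unfold pvGroup
    show List.map _ _ ++ _ = List.map _ _
    rw [pvKeys_add, PySem.Set.add_of_not_mem (fun h => hk ((PySem.Set.mem_ofList _ _).mp h)),
      List.map_append]
    congr 1
    · apply List.map_congr_left
      intro k' hk'
      have hne : k' ≠ k := fun he => hk (he ▸ (PySem.Set.mem_ofList _ _).mp hk')
      rw [pvInner_add_other qs c k l k' v hne]
    · have hfilter : qs.filter (fun q => q.1 == k) = [] := by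
        rw [List.filter_eq_nil_iff]
        intro q hq hq'
        exact hk (List.mem_map.mpr ⟨q, hq, by simpa using hq'⟩)
      have hemp : pvInner qs c k = PySem.Dict.empty := by simp [pvInner, hfilter]; rfl
      rw [List.map_singleton, ← hemp, pvInner_insert]
  
-- grouping only reads c on members of qs
lemma pvGroup_congr (qs : List (String × String)) (c c' : String × String → Int)
    (h : ∀ q ∈ qs, c q = c' q) : pvGroup qs c = pvGroup qs c' := by
  unfold pvGroup pvInner
  apply PySem.Dict.ext
  show List.map _ _ = List.map _ _
  apply List.map_congr_left
  intro k _
  have : List.map (fun q => (q.2, c q)) (qs.filter (fun q => q.1 == k))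
      = List.map (fun q => (q.2, c' q)) (qs.filter (fun q => q.1 == k)) :=
    List.map_congr_left (fun q hq => by rw [h q (List.mem_filter.mp hq).1])
  rw [this]

-- A's step is a raw write
lemma pvStepA_group (qs : List (String × String)) (c : String × String → Int)
    (p : String × String) :
    pvStepA (pvGroup qs c) p
      = pvGroup (PySem.Set.add qs p) (fun q => if q = p then (if p ∈ qs then c p + 1 else 1) else c q) := by
  obtain ⟨k, l⟩ := p
  have hstep : pvStepA (pvGroup qs c) (k, l)
      = pvStepRaw (pvGroup qs c) k l (if (k, l) ∈ qs then c (k, l) + 1 else 1) := by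
    unfold pvStepA pvStepRaw
    simp only []
    by_cases hc : (pvGroup qs c).contains k
    · simp only [hc, if_true]
      rw [show (pvGroup qs c).getD k PySem.Dict.empty = pvInner qs c k from pvGroup_getD qs c k]
      rw [pvInner_contains]
      by_cases h : (k, l) ∈ qs
      · rw [pvInner_getD qs c k l h]
        simp [h]
      · simp [h]
    · simp only [hc, Bool.false_eq_true, if_false]
      have hk : k ∉ qs.map Prod.fst := by
        rw [pvGroup_contains] at hc; simpa using hc
      have h : (k, l) ∉ qs := fun hm => hk (List.mem_map.mpr ⟨(k, l), hm, rfl⟩)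
      rw [PySem.Dict.getD_insert_self]
      have : (PySem.Dict.empty : PySem.Dict String Int).contains l = false := by
        simp [PySem.Dict.contains_empty]
      simp [this, h]
  rw [hstep, pvStepRaw_group]

-- characterisation of A's fold
lemma pvFoldA_eq (ps : List (String × String)) :
    ps.foldl pvStepA PySem.Dict.empty = pvGroup (PySem.Set.ofList ps) (fun q => (ps.count q : Int)) := by
  induction ps using List.reverseRecOn with
  | nil => rfl
  | append_singleton ps p ih =>
    rw [List.foldl_append, List.foldl_cons, List.foldl_nil, ih, pvStepA_group,
      ← PySem.Set.ofList_append_singleton]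
    apply pvGroup_congr
    intro q hq
    have hq' : q ∈ ps ++ [p] := (PySem.Set.mem_ofList _ _).mp hq
    by_cases hqp : q = p
    · subst hqp
      by_cases h : q ∈ ps
      · have h' : q ∈ PySem.Set.ofList ps := (PySem.Set.mem_ofList _ _).mpr h
        simp [h', List.count_append]
      · have h' : q ∉ PySem.Set.ofList ps := fun hh => h ((PySem.Set.mem_ofList _ _).mp hh)
        simp [h', List.count_append, List.count_eq_zero_of_not_mem h]
    · have hpq : p ≠ q := fun he => hqp he.symm
      simp [hqp, hpq, List.count_append]

-- characterisation of B's reshape fold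
lemma pvFoldR_eq (qs : List (String × String)) (h : qs.Nodup) (c : String × String → Int) :
    (qs.map (fun q => (q, c q))).foldl pvStepR PySem.Dict.empty = pvGroup qs c := by
  induction qs using List.reverseRecOn with
  | nil => rfl
  | append_singleton qs q ih =>
    have hnd : qs.Nodup := (List.nodup_append.mp h).1
    have hq : q ∉ qs := by
      have hd := (List.nodup_append.mp h).2.2
      intro hmem
      exact hd q hmem q (List.mem_singleton_self q) rfl
    rw [List.map_append, List.foldl_append, ih hnd, List.map_singleton, List.foldl_cons,
      List.foldl_nil]
    have hstep : pvStepR (pvGroup qs c) (q, c q) = pvStepRaw (pvGroup qs c) q.1 q.2 (c q) := rfl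
    rw [hstep, pvStepRaw_group]
    have : PySem.Set.add qs (q.1, q.2) = qs ++ [q] := by
      rw [show (q.1, q.2) = q from rfl]
      exact PySem.Set.add_of_not_mem hq
    rw [show ((q.1, q.2) : String × String) = q from rfl] at *
    rw [this]
    apply pvGroup_congr
    intro q' _
    by_cases hq' : q' = q
    · subst hq'; simp
    · simp [hq']

lemma pvMain (ps : List (String × String)) :
    ps.foldl pvStepA PySem.Dict.empty
      = ((ps.foldl (fun d p => d.insert p (d.getD p 0 + 1)) PySem.Dict.empty).items).foldl pvStepR PySem.Dict.empty := by
  rw [PySem.Dict.foldl_insert_getD_add_one_eq_counter, PySem.Dict.items_counter,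
    pvFoldR_eq _ (PySem.Set.nodup_ofList ps), pvFoldA_eq]

-- ===== VERDICT (by name: the statement is the Claim_ definition above) =====
theorem generate_dict_with_count_spec : Claim_equal_generate_dict_with_count := by
  intro level text _
  show _ = _
  rw [pvA_eq, pvB_eq, pvMain]
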